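-- pv_equiv track=rewrite | github.com/Kitten-hh/WEB_PMIS | ChatwithAi_app/Services/AiToolsFunctions copy.py | filter_empty_columns
-- ===== SOURCE A (Python) =====
-- def filter_empty_columns(data, headers):
--     # 确保数据为列表的列表
--     data = [list(row) for row in data]
--     headers = list(headers)
--     # 找出非空字段索引，强制排除 inc_id（无论大小写）
--     valid_columns = [
--         col_idx for col_idx in range(len(headers))
--         if headers[col_idx].lower() != "inc_id" and (
--             any(row[col_idx] not in [None, ""] for row in data)  # 检查数据
--             or headers[col_idx]  # 确保保留有表头的列
--         )
--     ]
--     # 过滤字段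
--     filtered_headers = [headers[col_idx] for col_idx in valid_columns]
--     filtered_data = [[row[col_idx] for col_idx in valid_columns] for row in data]
--     return filtered_headers, filtered_data
-- ===== SOURCE B (Python) =====
-- def filter_empty_columns(data, headers):
--     rows = [list(row) for row in data]
--     hs = list(headers)
--     # column-major: gather each column explicitly, keep (header, column) pairs
--     kept = []
--     for c, h in enumerate(hs):
--         col = [row[c] for row in rows]
--         if h.lower() != "inc_id" and (h or any(v not in (None, "") for v in col)):
--             kept.append((h, col))
--     cols = [col for _, col in kept]
--     # transpose the kept columns back into per-row lists
--     filtered_data = [list(t) for t in zip(*cols)] if cols else [[] for _ in rows]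
--     return [h for h, _ in kept], filtered_data
-- ===== Notes on version B (the rewrite author's own statement) =====
-- stated objective: alternative
-- what changed: B works column-major: it materialises each column as a list, keeps (header, column) pairs in one loop, and transposes the kept columns back into rows with zip(*cols), instead of A's index-set selection followed by per-row projection.
-- outside the precondition, e.g. on filter_empty_columns([[]], ['inc_id']): A returns ([], [[]]), B raises IndexError
import Mathlib
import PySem

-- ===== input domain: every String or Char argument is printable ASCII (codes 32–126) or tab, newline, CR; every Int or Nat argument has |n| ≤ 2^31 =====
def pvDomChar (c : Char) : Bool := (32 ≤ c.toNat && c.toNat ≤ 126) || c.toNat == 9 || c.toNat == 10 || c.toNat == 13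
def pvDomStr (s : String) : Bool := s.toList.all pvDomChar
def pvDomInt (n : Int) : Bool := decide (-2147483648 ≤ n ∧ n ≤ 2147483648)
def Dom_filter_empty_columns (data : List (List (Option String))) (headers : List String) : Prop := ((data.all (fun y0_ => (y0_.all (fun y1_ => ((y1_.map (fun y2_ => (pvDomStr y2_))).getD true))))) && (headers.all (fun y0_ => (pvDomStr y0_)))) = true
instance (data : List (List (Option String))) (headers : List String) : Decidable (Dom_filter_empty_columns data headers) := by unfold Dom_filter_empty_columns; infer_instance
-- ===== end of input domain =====

-- B is a column-major reformulation: it gathers each column as a list, keeps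
-- (header, column) pairs, and transposes the kept columns back into rows
-- (alternative structure, same cost).

-- `v not in [None, ""]` for a cell
def pvCellNonEmpty (v : Option String) : Bool :=
  match v with
  | none => false
  | some s => s != ""

-- ===== PORT A =====
def filter_empty_columns (data : List (List (Option String))) (headers : List String) : List String × List (List (Option String)) :=
  let valid := (List.range headers.length).filter (fun c =>
    PySem.Str.lower (headers.getD c "") != "inc_id" &&
      (data.any (fun row => pvCellNonEmpty (row.getD c none)) || headers.getD c "" != ""))
  (valid.map (fun c => headers.getD c ""),
   data.map (fun row => valid.map (fun c => row.getD c none)))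

-- ===== PORT B =====
-- zip(*cols): rows while every column still has an element; fuel = first column's length
def pvZipStar : Nat → List (List (Option String)) → List (List (Option String))
  | 0, _ => []
  | n + 1, cols =>
    if cols.all (fun c => !c.isEmpty) then
      (cols.map (fun c => c.headD none)) :: pvZipStar n (cols.map List.tail)
    else []

def filter_empty_columns_alt (data : List (List (Option String))) (headers : List String) : List String × List (List (Option String)) :=
  let kept := (PySem.List.enumerate headers).foldl
    (fun acc ch =>
      let col := data.map (fun row => PySem.List.pyGetD row ch.1 none)
      if PySem.Str.lower ch.2 != "inc_id" && (ch.2 != "" || col.any pvCellNonEmpty)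
      then acc ++ [(ch.2, col)] else acc) []
  let cols := kept.map Prod.snd
  let fd := if cols.isEmpty then data.map (fun _ => ([] : List (Option String)))
            else pvZipStar (cols.headD []).length cols
  (kept.map Prod.fst, fd)

-- ===== PRECONDITION & SPEC =====
-- Pre_ requires every row to have at least len(headers) cells: on shorter (ragged) rows
-- the Pythons index row[c] out of range and generally raise IndexError; A accidentally
-- returns on a few such inputs (e.g. when every column is excluded as inc_id) where B raises.
def Pre_filter_empty_columns (data : List (List (Option String))) (headers : List String) : Prop :=
  ∀ row ∈ data, headers.length ≤ row.length
instance (data : List (List (Option String))) (headers : List String) : Decidable (Pre_filter_empty_columns data headers) := by unfold Pre_filter_empty_columns; infer_instance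

def pvWitness_filter_empty_columns : List (List (Option String)) × List String :=
  ([[some "x", none]], ["a", ""])

def Spec_filter_empty_columns (data : List (List (Option String))) (headers : List String) (out : List String × List (List (Option String))) : Prop := out = filter_empty_columns_alt data headers
instance (data : List (List (Option String))) (headers : List String) (out : List String × List (List (Option String))) : Decidable (Spec_filter_empty_columns data headers out) := by unfold Spec_filter_empty_columns; infer_instance

-- ===== CLAIM =====
def Claim_equal_filter_empty_columns : Prop := ∀ (data : List (List (Option String))) (headers : List String), Dom_filter_empty_columns data headers → Pre_filter_empty_columns data headers → Spec_filter_empty_columns data headers (filter_empty_columns data headers)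

-- ===== LEMMAS AND PROOFS =====

theorem headD_eq_getD_zero (c : List (Option String)) : c.headD none = c.getD 0 none := by
  cases c <;> rfl

theorem tail_getD (c : List (Option String)) (i : Nat) :
    c.tail.getD i none = c.getD (i + 1) none := by
  cases c <;> simp [List.getD]

-- zip(*cols) of equal-length columns is the index-wise transpose
theorem pvZipStar_eq (n : Nat) (cols : List (List (Option String)))
    (hlen : ∀ c ∈ cols, c.length = n) :
    pvZipStar n cols = (List.range n).map (fun i => cols.map (fun c => c.getD i none)) := by
  induction n generalizing cols with
  | zero => simp [pvZipStar]
  | succ n ih =>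
    have hall : cols.all (fun c => !c.isEmpty) = true := by
      rw [List.all_eq_true]
      intro c hc
      cases c with
      | nil => exact absurd (hlen [] hc) (by simp)
      | cons a t => simp
    have htails : ∀ c ∈ cols.map List.tail, c.length = n := by
      intro c hc
      obtain ⟨d, hd, rfl⟩ := List.mem_map.mp hc
      have hdl := hlen d hd
      cases d with
      | nil => simp at hdl
      | cons a t => simpa using Nat.succ_injective (by simpa using hdl)
    rw [pvZipStar, if_pos hall, ih _ htails, List.range_succ_eq_map, List.map_cons]
    congr 1
    · exact List.map_congr_left (fun c _ => headD_eq_getD_zero c)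
    · rw [List.map_map]
      apply List.map_congr_left
      intro i _
      simp only [Function.comp_def, List.map_map]
      exact List.map_congr_left (fun c _ => tail_getD c i)

theorem getD_map_getD (data : List (List (Option String))) (f : List (Option String) → Option String)
    (i : Nat) (hi : i < data.length) :
    (data.map f).getD i none = f data[i] := by
  simp [List.getD, List.getElem?_map, List.getElem?_eq_getElem hi]

theorem filter_empty_columns_spec' (data : List (List (Option String))) (headers : List String) :
    filter_empty_columns data headers = filter_empty_columns_alt data headers := by
  unfold filter_empty_columns filter_empty_columns_alt
  -- characterise B's loop
  rw [PySem.List.foldl_append_if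
      (p := fun ch : Int × String =>
        PySem.Str.lower ch.2 != "inc_id" &&
          (ch.2 != "" || (data.map (fun row => PySem.List.pyGetD row ch.1 none)).any pvCellNonEmpty))
      (f := fun ch : Int × String => (ch.2, data.map (fun row => PySem.List.pyGetD row ch.1 none)))]
  rw [PySem.List.enumerate_eq_map_pyRange (d := ""), PySem.List.pyRange_one]
  simp only [List.filter_map, List.map_map, Function.comp_def, List.nil_append, zero_add,
    PySem.List.len_eq, sub_zero, Int.toNat_natCast]
  -- reduce Int indices to Nat getD
  have hcast : ∀ k : Nat, PySem.List.pyGetD headers ((k : Int)) "" = headers.getD k "" :=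
    fun k => PySem.List.pyGetD_natCast headers k ""
  have hcastR : ∀ (row : List (Option String)) (k : Nat),
      PySem.List.pyGetD row ((k : Int)) none = row.getD k none :=
    fun row k => PySem.List.pyGetD_natCast row k none
  simp only [hcast, hcastR]
  -- the two keep-predicates agree
  have hpred : (List.range headers.length).filter (fun c =>
        PySem.Str.lower (headers.getD c "") != "inc_id" &&
          (headers.getD c "" != "" ||
            (data.map (fun row => row.getD c none)).any pvCellNonEmpty)) =
      (List.range headers.length).filter (fun c =>
        PySem.Str.lower (headers.getD c "") != "inc_id" &&
          (data.any (fun row => pvCellNonEmpty (row.getD c none)) || headers.getD c "" != "")) := by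
    apply List.filter_congr
    intro c _
    simp [List.any_map, Bool.or_comm, Function.comp_def]
  rw [hpred]
  set valid := (List.range headers.length).filter (fun c =>
    PySem.Str.lower (headers.getD c "") != "inc_id" &&
      (data.any (fun row => pvCellNonEmpty (row.getD c none)) || headers.getD c "" != "")) with hv
  refine Prod.ext rfl ?_
  by_cases hnil : valid = []
  · simp [hnil]
  · have hne : (valid.map (fun c => data.map (fun row => row.getD c none))).isEmpty = false := by
      simp [List.isEmpty_eq_false_iff, hnil]
    simp only [hne, Bool.false_eq_true, if_false]
    have hlen : ∀ col ∈ valid.map (fun c => data.map (fun row => row.getD c none)),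
        col.length = data.length := by
      intro col hc
      obtain ⟨c, _, rfl⟩ := List.mem_map.mp hc
      simp
    have hhead : ((valid.map (fun c => data.map (fun row => row.getD c none))).headD []).length
        = data.length := by
      obtain ⟨c, t, hv'⟩ := List.exists_cons_of_ne_nil hnil
      simp [hv']
    rw [hhead, pvZipStar_eq _ _ hlen]
    apply List.ext_getElem (by simp)
    intro i h1 h2
    simp only [List.getElem_map, List.getElem_range, List.map_map, Function.comp_def]
    apply List.map_congr_left
    intro c _
    exact (getD_map_getD data (fun row => row.getD c none) i (by simpa using h1)).symm

-- ===== VERDICT =====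
theorem filter_empty_columns_spec : Claim_equal_filter_empty_columns := by
  intro data headers _ _
  exact filter_empty_columns_spec' data headers
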